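-- pv_equiv track=rewrite | github.com/taleylon/facility-design-project | facility design project.py | columns_steps
-- ===== SOURCE A (Python) =====
-- def columns_steps(current_loc, y_target):
--     first_movement, visited, steps = True, False, []
--
--     if y_target-current_loc[1] > 0: # walking from left to right
--         for y in range(current_loc[1],y_target,1):
--             visited=True
--             if first_movement:
--                 step1 = [((current_loc[0],y), (current_loc[0],y+1), False)]
--                 step2 = [((current_loc[0],y+1), (current_loc[0],y), True)]
--                 steps.extend(step1+step2)
--                 first_movement=False
--             else:
--                 step1 = [((current_loc[0],y-1), (current_loc[0],y), False)]
--                 step2 = [((current_loc[0],y), (current_loc[0],y+1), False)]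
--                 step3 = [((current_loc[0],y+1), (current_loc[0],y), True)]
--                 steps.extend(step1+step2+step3)
--         # last move to the escort, but we make sure that we have done earlier steps
--         if visited:
--             steps.extend([((current_loc[0],y_target-1), (current_loc[0],y_target), False)])
--     else: # walking from right to left
--         for y in range(current_loc[1],y_target,-1):
--             visited=True
--             if first_movement:
--                 step1 = [((current_loc[0],y), (current_loc[0],y-1), False)]
--                 step2 = [((current_loc[0],y-1), (current_loc[0],y), True)]
--                 steps.extend(step1+step2)
--                 first_movement=False
--             else:
--                 step1 = [((current_loc[0],y+1), (current_loc[0],y), False)]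
--                 step2 = [((current_loc[0],y), (current_loc[0],y-1), False)]
--                 step3 = [((current_loc[0],y-1), (current_loc[0],y), True)]
--                 steps.extend(step1+step2+step3)
--         # last move to the escort, but we make sure that we have done earlier steps
--         if visited:
--             steps.extend([((current_loc[0],y_target+1), (current_loc[0],y_target), False)])
--
--     return steps
-- ===== SOURCE B (Python) =====
-- def columns_steps(current_loc, y_target):
--     x, c = current_loc
--     if y_target == c:
--         return []
--     d = 1 if y_target > c else -1
--     # ordered walk of y-positions: advance, retreat, re-advance ... then final move
--     pos = [c, c + d, c]
--     for y in range(c + d, y_target, d):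
--         pos.extend([y, y + d, y])
--     pos.append(y_target)
--     # derive steps: flag True exactly on retreats (moves opposite to overall direction)
--     return [((x, p), (x, q), (q - p) * d < 0) for p, q in zip(pos, pos[1:])]
-- ===== Notes on version B (the rewrite author's own statement) =====
-- stated objective: alternative
-- what changed: B replaces A's two direction-specific loops that extend 2- or 3-step blocks per index with a single direction-signed pass: it first builds the ordered list of y-positions the column actually walks, then zips consecutive positions into step tuples, deriving the retreat flag from the sign of each move.
import Mathlib
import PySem

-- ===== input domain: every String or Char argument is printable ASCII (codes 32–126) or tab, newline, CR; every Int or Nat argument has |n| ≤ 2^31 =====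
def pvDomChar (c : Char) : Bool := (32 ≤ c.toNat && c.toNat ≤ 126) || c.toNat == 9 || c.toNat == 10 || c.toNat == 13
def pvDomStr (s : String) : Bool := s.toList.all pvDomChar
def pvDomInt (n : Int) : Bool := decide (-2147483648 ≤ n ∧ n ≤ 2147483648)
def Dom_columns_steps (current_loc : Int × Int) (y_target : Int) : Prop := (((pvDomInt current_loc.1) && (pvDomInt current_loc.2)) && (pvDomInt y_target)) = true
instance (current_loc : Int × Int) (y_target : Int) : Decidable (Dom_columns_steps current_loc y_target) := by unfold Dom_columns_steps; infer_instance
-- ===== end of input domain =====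

-- B builds the walked y-position list and zips consecutive positions into steps, replacing A's
-- per-index block-extending loops; genuinely different decomposition, same cost (objective: alternative).

-- ===== PORT A =====
def columns_steps (current_loc : Int × Int) (y_target : Int) : List ((Int × Int) × (Int × Int) × Bool) :=
  let x := current_loc.1
  if y_target - current_loc.2 > 0 then
    -- walking from left to right
    let st := (PySem.List.pyRange current_loc.2 y_target 1).foldl
      (fun (s : Bool × Bool × List ((Int × Int) × (Int × Int) × Bool)) y =>
        if s.1 then
          (false, true, s.2.2 ++ ([((x, y), (x, y + 1), false)] ++ [((x, y + 1), (x, y), true)]))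
        else
          (false, true, s.2.2 ++ ([((x, y - 1), (x, y), false)] ++ [((x, y), (x, y + 1), false)] ++ [((x, y + 1), (x, y), true)])))
      (true, false, [])
    if st.2.1 then st.2.2 ++ [((x, y_target - 1), (x, y_target), false)] else st.2.2
  else
    -- walking from right to left
    let st := (PySem.List.pyRange current_loc.2 y_target (-1)).foldl
      (fun (s : Bool × Bool × List ((Int × Int) × (Int × Int) × Bool)) y =>
        if s.1 then
          (false, true, s.2.2 ++ ([((x, y), (x, y - 1), false)] ++ [((x, y - 1), (x, y), true)]))
        else
          (false, true, s.2.2 ++ ([((x, y + 1), (x, y), false)] ++ [((x, y), (x, y - 1), false)] ++ [((x, y - 1), (x, y), true)])))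
      (true, false, [])
    if st.2.1 then st.2.2 ++ [((x, y_target + 1), (x, y_target), false)] else st.2.2

-- ===== PORT B =====
def columns_steps_alt (current_loc : Int × Int) (y_target : Int) : List ((Int × Int) × (Int × Int) × Bool) :=
  let x := current_loc.1
  let c := current_loc.2
  if y_target == c then []
  else
    let d : Int := if y_target > c then 1 else -1
    let pos := ([c, c + d, c] ++
      (PySem.List.pyRange (c + d) y_target d).foldl (fun acc y => acc ++ [y, y + d, y]) []) ++ [y_target]
    (pos.zip pos.tail).map (fun pq => ((x, pq.1), (x, pq.2), decide ((pq.2 - pq.1) * d < 0)))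

-- ===== PRECONDITION & SPEC =====
def Spec_columns_steps (current_loc : Int × Int) (y_target : Int) (out : List ((Int × Int) × (Int × Int) × Bool)) : Prop := out = columns_steps_alt current_loc y_target
instance (current_loc : Int × Int) (y_target : Int) (out : List ((Int × Int) × (Int × Int) × Bool)) : Decidable (Spec_columns_steps current_loc y_target out) := by unfold Spec_columns_steps; infer_instance

-- ===== CLAIM (what is proved, stated in full; the proofs are below) =====
def Claim_equal_columns_steps : Prop := ∀ (current_loc : Int × Int) (y_target : Int), Dom_columns_steps current_loc y_target → Spec_columns_steps current_loc y_target (columns_steps current_loc y_target)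

-- ===== LEMMAS AND PROOFS =====

-- the run of y-values a, a+d, a+2d, … of length n
def pvFrom (a d : Int) : Nat → List Int
  | 0 => []
  | n + 1 => a :: pvFrom (a + d) d n

-- common closed form: the step list for a walk of distance n+1 from c in direction d
def pvCore (x c d : Int) : Nat → List ((Int × Int) × (Int × Int) × Bool)
  | 0 => [((x, c), (x, c + d), false), ((x, c + d), (x, c), true), ((x, c), (x, c + d), false)]
  | n + 1 => ((x, c), (x, c + d), false) :: ((x, c + d), (x, c), true) :: ((x, c), (x, c + d), false) ::
      pvCore x (c + d) d n

def pvPairs : List Int → List (Int × Int)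
  | a :: b :: r => (a, b) :: pvPairs (b :: r)
  | _ => []

theorem pyRange_one_eq_pvFrom : ∀ (n : Nat) (a t : Int), (t - a).toNat = n →
    PySem.List.pyRange a t 1 = pvFrom a 1 n := by
  intro n
  induction n with
  | zero => intro a t h; rw [PySem.List.pyRange_one_eq_nil (by omega)]; rfl
  | succ n ih =>
    intro a t h
    rw [PySem.List.pyRange_one_cons (by omega), pvFrom, ih (a + 1) t (by omega)]

theorem pyRange_neg_one_eq_pvFrom : ∀ (n : Nat) (a t : Int), (a - t).toNat = n →
    PySem.List.pyRange a t (-1) = pvFrom a (-1) n := by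
  intro n
  induction n with
  | zero => intro a t h; rw [PySem.List.pyRange_neg_one_eq_nil (by omega)]; rfl
  | succ n ih =>
    intro a t h
    rw [PySem.List.pyRange_neg_one_cons (by omega), pvFrom,
      show a - 1 = a + -1 from by ring, ih (a + -1) t (by omega)]

-- loop shape of A after the first iteration
theorem pvFoldA_rest {α : Type} (G0 GA : Int → List α) :
    ∀ (ys : List Int) (s : List α),
    ys.foldl (fun (st : Bool × Bool × List α) y =>
        if st.1 then (false, true, st.2.2 ++ G0 y) else (false, true, st.2.2 ++ GA y))
      (false, true, s)
    = (false, true, s ++ ys.flatMap GA) := by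
  intro ys
  induction ys with
  | nil => intro s; simp
  | cons y ys ih => intro s; simp [List.foldl_cons, ih, List.append_assoc]

theorem pvFoldA_all {α : Type} (G0 GA : Int → List α) (y0 : Int) (ys : List Int) :
    (y0 :: ys).foldl (fun (st : Bool × Bool × List α) y =>
        if st.1 then (false, true, st.2.2 ++ G0 y) else (false, true, st.2.2 ++ GA y))
      (true, false, [])
    = (false, true, G0 y0 ++ ys.flatMap GA) := by
  simp [List.foldl_cons, pvFoldA_rest]

theorem pvFoldB {d : Int} : ∀ (ys : List Int) (acc : List Int),
    ys.foldl (fun acc y => acc ++ [y, y + d, y]) acc = acc ++ ys.flatMap (fun y => [y, y + d, y]) := by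
  intro ys
  induction ys with
  | nil => intro acc; simp
  | cons y ys ih => intro acc; simp [List.foldl_cons, ih, List.append_assoc]

theorem pvZipTail : ∀ (l : List Int), l.zip l.tail = pvPairs l := by
  intro l
  induction l with
  | nil => rfl
  | cons a l ih =>
    cases l with
    | nil => rfl
    | cons b r => simpa [pvPairs, List.zip] using ih

-- A's accumulated steps equal the closed form
theorem pvMainA : ∀ (n : Nat) (x a d : Int),
    ([((x, a), (x, a + d), false), ((x, a + d), (x, a), true)] ++
      (pvFrom (a + d) d n).flatMap
        (fun y => [((x, y - d), (x, y), false), ((x, y), (x, y + d), false), ((x, y + d), (x, y), true)]) ++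
      [((x, a + n * d), (x, a + n * d + d), false)])
    = pvCore x a d n := by
  intro n
  induction n with
  | zero => intro x a d; simp [pvFrom, pvCore]
  | succ n ih =>
    intro x a d
    have h := ih x (a + d) d
    simp only [pvFrom, pvCore, List.flatMap_cons] at *
    rw [← h]
    simp
    ring

-- B's position-walk pairs equal the closed form
theorem pvMainB : ∀ (n : Nat) (x a d : Int), (d = 1 ∨ d = -1) →
    ((pvPairs (([a, a + d, a] ++ (pvFrom (a + d) d n).flatMap (fun y => [y, y + d, y])) ++ [a + n * d + d])).map
        (fun pq => ((x, pq.1), (x, pq.2), decide ((pq.2 - pq.1) * d < 0))))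
    = pvCore x a d n := by
  intro n
  induction n with
  | zero =>
    intro x a d hd
    rcases hd with rfl | rfl <;> simp [pvFrom, pvPairs, pvCore]
  | succ n ih =>
    intro x a d hd
    have h := ih x (a + d) d hd
    simp only [pvFrom, pvCore, List.flatMap_cons] at *
    rw [← h]
    rcases hd with rfl | rfl <;>
      simp [pvPairs] <;> ring_nf

-- evaluating the ports in each direction
theorem pvA_eq (x c : Int) : columns_steps (x, c) c = [] := by
  simp [columns_steps, PySem.List.pyRange_neg_one_eq_nil le_rfl]

theorem pvB_eq (x c : Int) : columns_steps_alt (x, c) c = [] := by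
  simp [columns_steps_alt]

theorem pvA_pos (x c t : Int) (n : Nat) (h : (t - c).toNat = n + 1) :
    columns_steps (x, c) t = pvCore x c 1 n := by
  simp only [columns_steps]
  rw [if_pos (by first | (simp <;> omega) | omega), pyRange_one_eq_pvFrom (n + 1) _ t (by simpa using h), pvFrom,
    pvFoldA_all (fun y => [(((x, c).1, y), ((x, c).1, y + 1), false)] ++ [(((x, c).1, y + 1), ((x, c).1, y), true)])
      (fun y => [(((x, c).1, y - 1), ((x, c).1, y), false)] ++ [(((x, c).1, y), ((x, c).1, y + 1), false)] ++ [(((x, c).1, y + 1), ((x, c).1, y), true)])]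
  rw [← pvMainA n x c 1]
  simp
  omega

theorem pvA_neg (x c t : Int) (n : Nat) (h : (c - t).toNat = n + 1) :
    columns_steps (x, c) t = pvCore x c (-1) n := by
  have ht : t = c + -(n : Int) + -1 := by omega
  subst ht
  simp only [columns_steps]
  rw [if_neg (by first | (simp <;> omega) | omega), pyRange_neg_one_eq_pvFrom (n + 1) _ _ (by first | (simp <;> omega) | omega), pvFrom,
    pvFoldA_all (fun y => [(((x, c).1, y), ((x, c).1, y - 1), false)] ++ [(((x, c).1, y - 1), ((x, c).1, y), true)])
      (fun y => [(((x, c).1, y + 1), ((x, c).1, y), false)] ++ [(((x, c).1, y), ((x, c).1, y - 1), false)] ++ [(((x, c).1, y - 1), ((x, c).1, y), true)])]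
  rw [← pvMainA n x c (-1)]
  simp
  repeat' constructor
  all_goals first
    | ring
    | omega
    | (congr 1; funext y; simp [sub_eq_add_neg])

theorem pvB_pos (x c t : Int) (n : Nat) (h : (t - c).toNat = n + 1) :
    columns_steps_alt (x, c) t = pvCore x c 1 n := by
  have ht : t = c + (n : Int) + 1 := by omega
  subst ht
  simp only [columns_steps_alt]
  rw [if_neg (by first | (simp <;> omega) | omega), if_pos (by first | (simp <;> omega) | omega), pyRange_one_eq_pvFrom n _ _ (by first | (simp <;> omega) | omega),
    pvFoldB, pvZipTail]
  rw [← pvMainB n x c 1 (Or.inl rfl)]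
  simp

theorem pvB_neg (x c t : Int) (n : Nat) (h : (c - t).toNat = n + 1) :
    columns_steps_alt (x, c) t = pvCore x c (-1) n := by
  have ht : t = c + -(n : Int) + -1 := by omega
  subst ht
  simp only [columns_steps_alt]
  rw [if_neg (by first | (simp <;> omega) | omega), if_neg (by first | (simp <;> omega) | omega), pyRange_neg_one_eq_pvFrom n _ _ (by first | (simp <;> omega) | omega),
    pvFoldB, pvZipTail]
  rw [← pvMainB n x c (-1) (Or.inr rfl)]
  simp

-- ===== VERDICT (by name: the statement is the Claim_ definition above) =====
theorem columns_steps_spec : Claim_equal_columns_steps := by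
  intro cl t _
  obtain ⟨x, c⟩ := cl
  unfold Spec_columns_steps
  rcases lt_trichotomy c t with hlt | rfl | hgt
  · obtain ⟨n, hn⟩ : ∃ n : Nat, (t - c).toNat = n + 1 := ⟨(t - c).toNat - 1, by omega⟩
    rw [pvA_pos x c t n hn, pvB_pos x c t n hn]
  · rw [pvA_eq, pvB_eq]
  · obtain ⟨n, hn⟩ : ∃ n : Nat, (c - t).toNat = n + 1 := ⟨(c - t).toNat - 1, by omega⟩
    rw [pvA_neg x c t n hn, pvB_neg x c t n hn]
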